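-- pv_equiv track=rewrite | github.com/M0nero/disser | pipeline/app.py | _frame_segment_ids
-- ===== SOURCE A (Python) =====
-- from typing import Any, Dict, List, Optional, Tuple
--
-- def _frame_segment_ids(frame_count: int, segments: List[Dict[str, Any]]) -> List[int | None]:
--     out: List[int | None] = [None] * int(frame_count)
--     for seg in segments:
--         seg_id = int(seg.get("segment_id", -1))
--         if seg_id < 0:
--             continue
--         start = max(0, int(seg.get("start_frame", 0)))
--         end_excl = min(int(frame_count), max(start, int(seg.get("end_frame_exclusive", start))))
--         for frame_idx in range(start, end_excl):
--             out[frame_idx] = seg_id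
--     return out
-- ===== SOURCE B (Python) =====
-- from typing import Any, Dict, List, Optional, Tuple
--
-- def _frame_segment_ids(frame_count: int, segments: List[Dict[str, Any]]) -> List[int | None]:
--     # Per-frame lookup instead of per-segment painting: extract the valid segments'
--     # (id, start, end) once, in reverse order, then for each frame return the first
--     # covering entry ("last painter wins" becomes "first match in reverse order").
--     rev: List[Tuple[int, int, int]] = []
--     for seg in reversed(segments):
--         sid = int(seg.get("segment_id", -1))
--         if sid < 0:
--             continue
--         start = max(0, int(seg.get("start_frame", 0)))
--         end = int(seg.get("end_frame_exclusive", start))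
--         rev.append((sid, start, end))
--
--     def id_at(i: int) -> int | None:
--         for sid, start, end in rev:
--             if start <= i < end:
--                 return sid
--         return None
--
--     return [id_at(i) for i in range(int(frame_count))]
-- ===== Notes on version B (the rewrite author's own statement) =====
-- stated objective: alternative
-- what changed: Replaces per-segment interval painting into a mutable array (last write wins) with a per-frame reverse scan of the segments that returns the first covering segment id, so no array is mutated and the min/max clamping against frame_count disappears.
import Mathlib
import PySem

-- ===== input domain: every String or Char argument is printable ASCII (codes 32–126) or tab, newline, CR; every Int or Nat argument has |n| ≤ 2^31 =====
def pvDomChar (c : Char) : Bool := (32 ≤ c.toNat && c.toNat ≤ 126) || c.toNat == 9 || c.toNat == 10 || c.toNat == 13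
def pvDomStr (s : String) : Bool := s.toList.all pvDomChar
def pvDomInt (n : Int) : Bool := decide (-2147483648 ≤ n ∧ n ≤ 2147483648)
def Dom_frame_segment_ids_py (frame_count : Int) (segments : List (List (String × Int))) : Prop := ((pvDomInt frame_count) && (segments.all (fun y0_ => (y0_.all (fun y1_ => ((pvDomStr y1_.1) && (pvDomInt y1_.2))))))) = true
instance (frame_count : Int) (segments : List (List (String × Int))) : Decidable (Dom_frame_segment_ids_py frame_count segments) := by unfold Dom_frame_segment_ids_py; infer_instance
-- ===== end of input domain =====

-- B replaces A's per-segment painting of a mutable array (last write wins) by a per-frame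
-- reverse scan returning the first covering segment id; alternative decomposition, no speed claim.

-- ===== PORT A =====
-- paints out[frame_idx] = seg_id over range(start, end_excl); indices are in range and
-- nonnegative there, so List.set on frame_idx.toNat is exact
def frame_segment_ids_py (frame_count : Int) (segments : List (List (String × Int))) : List (Option Int) :=
  let out : List (Option Int) := List.replicate frame_count.toNat none
  segments.foldl (fun out seg =>
    let d := PySem.Dict.ofList seg
    let seg_id := d.getD "segment_id" (-1)
    if seg_id < 0 then out
    else
      let start := max 0 (d.getD "start_frame" 0)
      let end_excl := min frame_count (max start (d.getD "end_frame_exclusive" start))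
      (PySem.List.pyRange start end_excl 1).foldl
        (fun out frame_idx => out.set frame_idx.toNat (some seg_id)) out) out

-- ===== PORT B =====
-- B's build loop: (segment_id, start, end) of a valid segment, none for an invalid one
def pvFields (seg : List (String × Int)) : Option (Int × Int × Int) :=
  let d := PySem.Dict.ofList seg
  let sid := d.getD "segment_id" (-1)
  if sid < 0 then none
  else
    let start := max 0 (d.getD "start_frame" 0)
    let endE := d.getD "end_frame_exclusive" start
    some (sid, start, endE)

-- B's inner loop: first entry of the reversed table covering frame i
def pvIdAt (i : Int) : List (Int × Int × Int) → Option Int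
  | [] => none
  | (sid, start, endE) :: rest =>
    if start ≤ i ∧ i < endE then some sid else pvIdAt i rest

def frame_segment_ids_py_alt (frame_count : Int) (segments : List (List (String × Int))) : List (Option Int) :=
  let rev := segments.reverse.filterMap pvFields
  (PySem.List.pyRange 0 frame_count 1).map (fun i => pvIdAt i rev)

-- ===== PRECONDITION & SPEC =====
def Spec_frame_segment_ids_py (frame_count : Int) (segments : List (List (String × Int))) (out : List (Option Int)) : Prop := out = frame_segment_ids_py_alt frame_count segments
instance (frame_count : Int) (segments : List (List (String × Int))) (out : List (Option Int)) : Decidable (Spec_frame_segment_ids_py frame_count segments out) := by unfold Spec_frame_segment_ids_py; infer_instance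

-- ===== CLAIM (what is proved, stated in full; the proofs are below) =====
def Claim_equal_frame_segment_ids_py : Prop := ∀ (frame_count : Int) (segments : List (List (String × Int))), Dom_frame_segment_ids_py frame_count segments → Spec_frame_segment_ids_py frame_count segments (frame_segment_ids_py frame_count segments)

-- ===== LEMMAS AND PROOFS =====

-- "this segment hits frame i" as A clamps it (end clamped by frame_count)
def pvHitC (fc : Int) (seg : List (String × Int)) (i : Int) : Option Int :=
  if (PySem.Dict.ofList seg).getD "segment_id" (-1) < 0 then none
  else if max 0 ((PySem.Dict.ofList seg).getD "start_frame" 0) ≤ i ∧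
      i < min fc (max (max 0 ((PySem.Dict.ofList seg).getD "start_frame" 0))
        ((PySem.Dict.ofList seg).getD "end_frame_exclusive" (max 0 ((PySem.Dict.ofList seg).getD "start_frame" 0))))
    then some ((PySem.Dict.ofList seg).getD "segment_id" (-1)) else none

-- "this segment hits frame i" as B tests it (no clamp by frame_count)
def pvHitU (seg : List (String × Int)) (i : Int) : Option Int :=
  if (PySem.Dict.ofList seg).getD "segment_id" (-1) < 0 then none
  else if max 0 ((PySem.Dict.ofList seg).getD "start_frame" 0) ≤ i ∧
      i < (PySem.Dict.ofList seg).getD "end_frame_exclusive" (max 0 ((PySem.Dict.ofList seg).getD "start_frame" 0))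
    then some ((PySem.Dict.ofList seg).getD "segment_id" (-1)) else none

lemma pvIdAt_eq_findSome? (i : Int) (l : List (List (String × Int))) :
    pvIdAt i (l.filterMap pvFields) = l.findSome? (fun seg => pvHitU seg i) := by
  induction l with
  | nil => rfl
  | cons seg rest ih =>
    rw [List.filterMap_cons, List.findSome?_cons]
    by_cases h1 : (PySem.Dict.ofList seg).getD "segment_id" (-1) < 0
    · have hf : pvFields seg = none := by simp [pvFields, h1]
      have hu : pvHitU seg i = none := by simp [pvHitU, h1]
      rw [hf, hu]
      exact ih
    · have hf : pvFields seg = some ((PySem.Dict.ofList seg).getD "segment_id" (-1),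
          max 0 ((PySem.Dict.ofList seg).getD "start_frame" 0),
          (PySem.Dict.ofList seg).getD "end_frame_exclusive"
            (max 0 ((PySem.Dict.ofList seg).getD "start_frame" 0))) := by
        simp [pvFields, h1]
      rw [hf]
      simp only [pvIdAt]
      by_cases h2 : max 0 ((PySem.Dict.ofList seg).getD "start_frame" 0) ≤ i ∧
          i < (PySem.Dict.ofList seg).getD "end_frame_exclusive"
            (max 0 ((PySem.Dict.ofList seg).getD "start_frame" 0))
      · have hu : pvHitU seg i = some ((PySem.Dict.ofList seg).getD "segment_id" (-1)) := by
          simp only [pvHitU]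
          rw [if_neg h1, if_pos h2]
        rw [hu, if_pos h2]
      · have hu : pvHitU seg i = none := by
          simp only [pvHitU]
          rw [if_neg h1, if_neg h2]
        rw [hu, if_neg h2]
        exact ih

lemma pvHitC_eq_pvHitU (fc : Int) (seg : List (String × Int)) (i : Int)
    (h0 : 0 ≤ i) (hfc : i < fc) : pvHitC fc seg i = pvHitU seg i := by
  simp only [pvHitC, pvHitU]
  split_ifs <;> first | rfl | omega

lemma foldl_set_length (l : List Int) (v : Option Int) (out : List (Option Int)) :
    (l.foldl (fun o i => o.set i.toNat v) out).length = out.length := by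
  induction l generalizing out with
  | nil => rfl
  | cons x l ih => simp [List.foldl, ih]

lemma foldl_set_getElem? (l : List Int) (v : Option Int) (out : List (Option Int)) (j : Nat)
    (hl : ∀ x ∈ l, 0 ≤ x) :
    (l.foldl (fun o i => o.set i.toNat v) out)[j]? =
      if (j : Int) ∈ l ∧ j < out.length then some v else out[j]? := by
  induction l generalizing out with
  | nil => simp
  | cons x l ih =>
    have hx : 0 ≤ x := hl x (by simp)
    have hl' : ∀ y ∈ l, 0 ≤ y := fun y hy => hl y (by simp [hy])
    simp only [List.foldl_cons]
    rw [ih _ hl']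
    simp only [List.length_set, List.mem_cons, List.getElem?_set]
    by_cases hmem : (j : Int) ∈ l
    · by_cases hj : j < out.length <;> (simp [hmem, hj]; try omega)
    · by_cases hxe : x.toNat = j
      · have : (j : Int) = x := by omega
        by_cases hj : j < out.length <;> simp [hxe, hj, this]
      · have : ¬ ((j : Int) = x) := by omega
        simp [hmem, hxe, this]

-- one painting step of A, elementwise
lemma paint_getElem? (fc : Int) (seg : List (String × Int)) (out : List (Option Int)) (j : Nat)
    (hj : j < out.length) :
    ((fun out seg =>
      let d := PySem.Dict.ofList seg
      let seg_id := d.getD "segment_id" (-1)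
      if seg_id < 0 then out
      else
        let start := max 0 (d.getD "start_frame" 0)
        let end_excl := min fc (max start (d.getD "end_frame_exclusive" start))
        (PySem.List.pyRange start end_excl 1).foldl
          (fun out frame_idx => out.set frame_idx.toNat (some seg_id)) out)
        out seg)[j]? =
      match pvHitC fc seg j with
      | some s => some (some s)
      | none => out[j]? := by
  simp only [pvHitC]
  split_ifs with h1 h2
  · rfl
  · rw [foldl_set_getElem? _ _ _ _
      (fun x hx => by simp only [PySem.List.mem_pyRange_one] at hx; omega)]
    simp only [PySem.List.mem_pyRange_one]
    rw [if_pos ⟨⟨h2.1, h2.2⟩, hj⟩]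
  · rw [foldl_set_getElem? _ _ _ _
      (fun x hx => by simp only [PySem.List.mem_pyRange_one] at hx; omega)]
    simp only [PySem.List.mem_pyRange_one]
    rw [if_neg (fun hc => h2 ⟨hc.1.1, hc.1.2⟩)]

lemma afold_length (fc : Int) (segs : List (List (String × Int))) (out : List (Option Int)) :
    (segs.foldl (fun out seg =>
      let d := PySem.Dict.ofList seg
      let seg_id := d.getD "segment_id" (-1)
      if seg_id < 0 then out
      else
        let start := max 0 (d.getD "start_frame" 0)
        let end_excl := min fc (max start (d.getD "end_frame_exclusive" start))
        (PySem.List.pyRange start end_excl 1).foldl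
          (fun out frame_idx => out.set frame_idx.toNat (some seg_id)) out) out).length
      = out.length := by
  induction segs generalizing out with
  | nil => rfl
  | cons seg rest ih =>
    simp only [List.foldl_cons]
    rw [ih]
    split_ifs with h1
    · rfl
    · exact foldl_set_length _ _ _

lemma afold_getElem? (fc : Int) (segs : List (List (String × Int))) (out : List (Option Int))
    (j : Nat) (hj : j < out.length) :
    (segs.foldl (fun out seg =>
      let d := PySem.Dict.ofList seg
      let seg_id := d.getD "segment_id" (-1)
      if seg_id < 0 then out
      else
        let start := max 0 (d.getD "start_frame" 0)
        let end_excl := min fc (max start (d.getD "end_frame_exclusive" start))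
        (PySem.List.pyRange start end_excl 1).foldl
          (fun out frame_idx => out.set frame_idx.toNat (some seg_id)) out) out)[j]? =
      match segs.reverse.findSome? (fun seg => pvHitC fc seg j) with
      | some s => some (some s)
      | none => out[j]? := by
  induction segs generalizing out with
  | nil => simp
  | cons seg rest ih =>
    simp only [List.foldl_cons, List.reverse_cons]
    have hpaint := paint_getElem? fc seg out j hj
    have hlen : ((fun out seg =>
      let d := PySem.Dict.ofList seg
      let seg_id := d.getD "segment_id" (-1)
      if seg_id < 0 then out
      else
        let start := max 0 (d.getD "start_frame" 0)
        let end_excl := min fc (max start (d.getD "end_frame_exclusive" start))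
        (PySem.List.pyRange start end_excl 1).foldl
          (fun out frame_idx => out.set frame_idx.toNat (some seg_id)) out) out seg).length
        = out.length := by
      simp only
      split_ifs with h1
      · rfl
      · exact foldl_set_length _ _ _
    rw [ih _ (by rw [hlen]; exact hj)]
    cases hfs : rest.reverse.findSome? (fun seg => pvHitC fc seg (j : Int)) with
    | some s => simp [List.findSome?_append, hfs]
    | none =>
      rw [hpaint]
      simp only [List.findSome?_append, hfs, List.findSome?]
      cases pvHitC fc seg (j : Int) <;> simp

lemma pvFindSome?_congr {a b : Type} (f g : a → Option b) (l : List a)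
    (h : ∀ x ∈ l, f x = g x) : l.findSome? f = l.findSome? g := by
  induction l with
  | nil => rfl
  | cons x l ih =>
    rw [List.findSome?_cons, List.findSome?_cons, h x (by simp),
      ih (fun y hy => h y (by simp [hy]))]

theorem frame_segment_ids_py_eq (fc : Int) (segs : List (List (String × Int))) :
    frame_segment_ids_py fc segs = frame_segment_ids_py_alt fc segs := by
  unfold frame_segment_ids_py frame_segment_ids_py_alt
  simp only
  apply List.ext_getElem?
  intro j
  by_cases hj : j < fc.toNat
  · rw [afold_getElem? fc segs _ j (by simp [hj])]
    have hB : (List.map (fun i => pvIdAt i (segs.reverse.filterMap pvFields)) (PySem.List.pyRange 0 fc 1))[j]? =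
        some (pvIdAt (j : Int) (segs.reverse.filterMap pvFields)) := by
      rw [PySem.List.pyRange_one]
      have h0 : ((fc : Int) - 0).toNat = fc.toNat := by omega
      rw [h0, List.map_map, List.getElem?_map, List.getElem?_range hj]
      simp
    rw [hB, pvIdAt_eq_findSome?]

    rw [pvFindSome?_congr (fun seg => pvHitC fc seg (j : Int)) (fun seg => pvHitU seg (j : Int))
      segs.reverse (fun seg _ => pvHitC_eq_pvHitU fc seg (j : Int) (by omega) (by omega))]
    cases segs.reverse.findSome? (fun seg => pvHitU seg (j : Int)) with
    | some s => simp
    | none => simp [hj]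
  · rw [List.getElem?_eq_none (by rw [afold_length]; simp; omega),
      List.getElem?_eq_none (by simp [PySem.List.length_pyRange_one]; omega)]

-- ===== VERDICT (by name: the statement is the Claim_ definition above) =====
theorem frame_segment_ids_py_spec : Claim_equal_frame_segment_ids_py := by
  intro fc segs _
  exact frame_segment_ids_py_eq fc segs
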